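-- pv_equiv track=rewrite | github.com/R-Dson/babyagi4all-api | ooba_web.py | get_search_strings
-- ===== SOURCE A (Python) =====
-- SEARCH_START = '<|START_SEARCH_TOKEN|>'
--
-- SEARCH_START_LOWER = '<|START_SEARCH_TOKEN|>'.lower()
--
-- SEARCH_END = '<|END_SEARCH_TOKEN|>'
--
-- SEARCH_END_LOWER = '<|END_SEARCH_TOKEN|>'.lower()
--
-- def get_search_strings(result: str) -> list[tuple]:
--     strings = []
--     ind_start = result.lower().find(SEARCH_START_LOWER)
--     while ind_start > -1:
--         ind_end = result.lower().find(SEARCH_END_LOWER, ind_start)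
--         if ind_end == -1:
--             break
--         mid_string = result[ind_start + len(SEARCH_START): ind_end]
--         updated_string = result[:ind_start] + result[ind_end + len(SEARCH_END):]
--         strings.append((mid_string.strip(), updated_string.strip()))
--         ind_start = result.lower().find(SEARCH_START_LOWER, ind_end)
--
--     return strings
-- ===== SOURCE B (Python) =====
-- SEARCH_START = '<|START_SEARCH_TOKEN|>'
-- SEARCH_END = '<|END_SEARCH_TOKEN|>'
--
-- def get_search_strings(result: str) -> list[tuple]:
--     low = result.lower()
--     s_tok = SEARCH_START.lower()
--     e_tok = SEARCH_END.lower()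
--     starts = [i for i in range(len(low)) if low.startswith(s_tok, i)]
--     ends = [i for i in range(len(low)) if low.startswith(e_tok, i)]
--     out = []
--     i = j = 0
--     while i < len(starts):
--         a = starts[i]
--         while j < len(ends) and ends[j] < a:
--             j += 1
--         if j == len(ends):
--             break
--         b = ends[j]
--         out.append((result[a + len(SEARCH_START):b].strip(),
--                     (result[:a] + result[b + len(SEARCH_END):]).strip()))
--         while i < len(starts) and starts[i] <= b:
--             i += 1
--     return out
-- ===== Notes on version B (the rewrite author's own statement) =====
-- stated objective: alternative
-- what changed: A's incremental lower().find()/resume-index while-loop is replaced by precomputing the sorted lists of all start-token and end-token occurrence positions once and merging them with two pointers.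
import Mathlib
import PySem

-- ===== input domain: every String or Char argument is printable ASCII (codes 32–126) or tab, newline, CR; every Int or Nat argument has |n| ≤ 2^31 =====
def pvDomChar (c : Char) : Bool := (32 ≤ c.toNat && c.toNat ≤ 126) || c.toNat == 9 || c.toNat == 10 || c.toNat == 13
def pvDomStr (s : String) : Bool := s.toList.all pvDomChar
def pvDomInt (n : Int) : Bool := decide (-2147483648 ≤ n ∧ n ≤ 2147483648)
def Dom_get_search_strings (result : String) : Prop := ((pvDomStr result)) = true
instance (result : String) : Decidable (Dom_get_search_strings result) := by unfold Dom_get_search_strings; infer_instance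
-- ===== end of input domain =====

-- B replaces A's incremental lower().find() loop by precomputed sorted occurrence-index
-- lists for both tokens merged with two pointers (alternative decomposition; no speed claim).

-- ===== PORT A =====
-- module constants SEARCH_START / SEARCH_END and their .lower() forms
def pvSS : List Char := "<|START_SEARCH_TOKEN|>".toList
def pvSSlow : List Char := PySem.Chars.lower pvSS
def pvSE : List Char := "<|END_SEARCH_TOKEN|>".toList
def pvSElow : List Char := PySem.Chars.lower pvSE

-- A's while-loop; fuel only makes the recursion total (the loop advances ind_start each turn)
def pvALoop (l : List Char) (fuel : Nat) (ind_start : Int) : List (String × String) :=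
  match fuel with
  | 0 => []
  | fuel + 1 =>
    if ind_start > -1 then
      let ind_end := PySem.Chars.findFrom (PySem.Chars.lower l) pvSElow ind_start none
      if ind_end = -1 then
        []
      else
        (String.ofList (PySem.Chars.strip (PySem.Chars.slice l (some (ind_start + (pvSS.length : Int))) (some ind_end))),
         String.ofList (PySem.Chars.strip (PySem.Chars.slice l none (some ind_start) ++
                                       PySem.Chars.slice l (some (ind_end + (pvSE.length : Int))) none))) ::
        pvALoop l fuel (PySem.Chars.findFrom (PySem.Chars.lower l) pvSSlow ind_end none)
    else []

def get_search_strings (result : String) : List (String × String) :=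
  pvALoop result.toList (result.toList.length + 1)
    (PySem.Chars.find (PySem.Chars.lower result.toList) pvSSlow)

-- ===== PORT B =====
-- [i for i in range(len(low)) if low.startswith(tok, i)]  (startswith with start i ≥ 0 is: tok prefix of low[i:])
def pvOcc (low tok : List Char) : List Nat :=
  (List.range low.length).filter (fun i => PySem.Chars.startswith (low.drop i) tok)

-- the head of a dropWhile fails the predicate (cited by pvBLoop's decreasing_by)
theorem pv_head_dropWhile {α : Type} (p : α → Bool) (l : List α) {b : α} {t : List α}
    (h : l.dropWhile p = b :: t) : p b = false := by
  induction l with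
  | nil => simp at h
  | cons x xs ih =>
    rw [List.dropWhile_cons] at h
    by_cases hp : p x = true
    · simp [hp] at h; exact ih h
    · simp [hp] at h; simpa [← h.1] using hp

-- B's two-pointer merge of the start- and end-occurrence lists
def pvBLoop (l : List Char) (starts ends : List Nat) : List (String × String) :=
  match starts with
  | [] => []
  | a :: rest =>
    match hE : ends.dropWhile (fun e => decide (e < a)) with
    | [] => []
    | b :: ends' =>
      (String.ofList (PySem.Chars.strip (PySem.Chars.slice l (some ((a : Int) + (pvSS.length : Int))) (some (b : Int)))),
       String.ofList (PySem.Chars.strip (PySem.Chars.slice l none (some (a : Int)) ++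
                                     PySem.Chars.slice l (some ((b : Int) + (pvSE.length : Int))) none))) ::
      pvBLoop l ((a :: rest).dropWhile (fun s => decide (s ≤ b))) (b :: ends')
  termination_by starts.length
  decreasing_by
    have hab : a ≤ b := by
      have := pv_head_dropWhile (fun e => decide (e < a)) ends hE
      simp at this; omega
    simp only [List.dropWhile_cons, decide_eq_true_eq, hab, if_pos]
    have := List.length_dropWhile_le (fun s => decide (s ≤ b)) rest
    simp only [List.length_cons]; omega

def get_search_strings_alt (result : String) : List (String × String) :=
  let l := result.toList
  let low := PySem.Chars.lower l
  pvBLoop l (pvOcc low pvSSlow) (pvOcc low pvSElow)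

-- ===== PRECONDITION & SPEC =====
def Spec_get_search_strings (result : String) (out : List (String × String)) : Prop := out = get_search_strings_alt result
instance (result : String) (out : List (String × String)) : Decidable (Spec_get_search_strings result out) := by unfold Spec_get_search_strings; infer_instance

-- ===== CLAIM (what is proved, stated in full; the proofs are below) =====
def Claim_equal_get_search_strings : Prop := ∀ (result : String), Dom_get_search_strings result → Spec_get_search_strings result (get_search_strings result)

-- ===== LEMMAS AND PROOFS =====

theorem pv_mem_occ {low tok : List Char} {i : Nat} :
    i ∈ pvOcc low tok ↔ i < low.length ∧ tok <+: low.drop i := by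
  simp [pvOcc, List.mem_filter, List.mem_range, PySem.Chars.startswith_iff]

theorem pv_occ_sorted (low tok : List Char) : (pvOcc low tok).Pairwise (· < ·) := by
  exact (List.pairwise_lt_range).filter _

-- dropping with a weaker threshold first changes nothing
theorem pv_dropWhile_dropWhile {p q : Nat → Bool} (hpq : ∀ x, p x = true → q x = true)
    (L : List Nat) : (L.dropWhile p).dropWhile q = L.dropWhile q := by
  induction L with
  | nil => simp
  | cons x t ih =>
    by_cases hx : p x = true
    · simp [hx, hpq x hx, ih]
    · simp [List.dropWhile_cons, hx]  -- keep: needed when p x = false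

-- findFrom = head of the occurrence list from k
theorem pv_findFrom_occ (low tok : List Char) (htok : tok ≠ []) (k : Nat) (hk : k ≤ low.length) :
    PySem.Chars.findFrom low tok (k : Int) none =
      match (pvOcc low tok).dropWhile (fun i => decide (i < k)) with
      | [] => -1
      | i :: _ => (i : Int) := by
  have hlen : ∀ {i : Nat}, tok <+: low.drop i → i < low.length := by
    intro i hpre
    by_contra h
    rw [List.drop_eq_nil_of_le (by omega)] at hpre
    exact htok (List.prefix_nil.mp hpre)
  have hinfix : (tok <:+: low.drop k) ↔ ∃ j, k ≤ j ∧ tok <+: low.drop j := by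
    rw [← PySem.Chars.isIn_iff_infix, ← PySem.Chars.exists_prefix_drop_iff_isIn]
    constructor
    · rintro ⟨j, hj⟩
      exact ⟨k + j, by omega, by rwa [List.drop_drop] at hj⟩
    · rintro ⟨j, hkj, hj⟩
      refine ⟨j - k, ?_⟩
      rw [List.drop_drop, Nat.add_sub_cancel' hkj]
      exact hj
  cases hD : (pvOcc low tok).dropWhile (fun i => decide (i < k)) with
  | nil =>
    simp only []
    rw [PySem.Chars.findFrom_natCast_eq_neg_one_iff low tok k hk, hinfix]
    rintro ⟨j, hkj, hj⟩
    have hmem : j ∈ pvOcc low tok := pv_mem_occ.mpr ⟨hlen hj, hj⟩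
    have := List.dropWhile_eq_nil_iff.mp hD j hmem
    simp at this; omega
  | cons i t =>
    simp only []
    have hmem : i ∈ pvOcc low tok :=
      (List.dropWhile_sublist _).subset (hD ▸ List.mem_cons_self)
    have hik : ¬ (i < k) := by
      have := pv_head_dropWhile _ _ hD; simpa using this
    obtain ⟨hilen, hiocc⟩ := pv_mem_occ.mp hmem
    have hne : PySem.Chars.findFrom low tok (k : Int) none ≠ -1 := by
      rw [Ne, PySem.Chars.findFrom_natCast_eq_neg_one_iff low tok k hk, not_not, hinfix]
      exact ⟨i, by omega, hiocc⟩
    obtain ⟨h1, h2, h3⟩ := PySem.Chars.findFrom_natCast_spec low tok k hk hne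
    set F := PySem.Chars.findFrom low tok (k : Int) none with hF
    have hF0 : 0 ≤ F := le_trans (by positivity) h1
    have hkm : k ≤ F.toNat := by omega
    -- i is minimal among occurrences ≥ k
    have hmin : ∀ x ∈ pvOcc low tok, k ≤ x → i ≤ x := by
      intro x hx hkx
      rcases (List.mem_append.mp (by rw [List.takeWhile_append_dropWhile (p := fun i => decide (i < k)) (l := pvOcc low tok)]; exact hx)) with hx' | hx'
      · have := List.mem_takeWhile_imp hx'; simp at this; omega
      · rw [hD] at hx'
        rcases List.mem_cons.mp hx' with rfl | hx''
        · exact le_rfl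
        · exact le_of_lt (List.rel_of_pairwise_cons (hD ▸ (List.Pairwise.sublist (List.dropWhile_sublist _) (pv_occ_sorted low tok))) hx'')
    have hmemF : F.toNat ∈ pvOcc low tok := pv_mem_occ.mpr ⟨hlen h2, h2⟩
    have hiF : i ≤ F.toNat := hmin _ hmemF hkm
    have hFi : ¬ (i < F.toNat) := fun hlt => h3 i (by omega) hlt hiocc
    have : F.toNat = i := by omega
    omega

-- dropWhile only looks at each element it meets
theorem pv_dropWhile_congr {p q : Nat → Bool} (L : List Nat) (h : ∀ x ∈ L, p x = q x) :
    L.dropWhile p = L.dropWhile q := by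
  induction L with
  | nil => rfl
  | cons x t ih =>
    have hx := h x (by simp)
    by_cases hp : p x = true
    · simp [hp, hx ▸ hp, ih fun y hy => h y (by simp [hy])]
    · have : p x = false := by simpa using hp
      simp [this, hx ▸ this]

-- unfolding lemmas for pvBLoop
theorem pvBLoop_nil (l : List Char) (E : List Nat) : pvBLoop l [] E = [] := by
  rw [pvBLoop.eq_def]

theorem pvBLoop_cons_nil (l : List Char) (a : Nat) (rest E : List Nat)
    (h : E.dropWhile (fun e => decide (e < a)) = []) : pvBLoop l (a :: rest) E = [] := by
  rw [pvBLoop.eq_def]; dsimp only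
  split
  · rfl
  · rename_i b ends' heq; rw [h] at heq; simp at heq

theorem pvBLoop_cons_cons (l : List Char) (a : Nat) (rest E ends' : List Nat) (b : Nat)
    (h : E.dropWhile (fun e => decide (e < a)) = b :: ends') :
    pvBLoop l (a :: rest) E =
      (String.ofList (PySem.Chars.strip (PySem.Chars.slice l (some ((a : Int) + (pvSS.length : Int))) (some (b : Int)))),
       String.ofList (PySem.Chars.strip (PySem.Chars.slice l none (some (a : Int)) ++
                                     PySem.Chars.slice l (some ((b : Int) + (pvSE.length : Int))) none))) ::
      pvBLoop l ((a :: rest).dropWhile (fun s => decide (s ≤ b))) (b :: ends') := by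
  rw [pvBLoop.eq_def]; dsimp only
  split
  · rename_i heq; rw [h] at heq; simp at heq
  · rename_i b' ends'' heq
    rw [h] at heq
    obtain ⟨rfl, rfl⟩ : b' = b ∧ ends'' = ends' := by
      constructor <;> [exact (List.cons.injEq .. ▸ heq).1.symm; exact (List.cons.injEq .. ▸ heq).2.symm]
    rfl

-- no position starts both tokens
theorem pv_clash (low : List Char) (p : Nat) :
    ¬ (pvSSlow <+: low.drop p ∧ pvSElow <+: low.drop p) := by
  rintro ⟨h1, h2⟩
  have e12 : pvSSlow[2]'(by decide) = pvSElow[2]'(by decide) := by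
    rw [h1.getElem (by decide), h2.getElem (by decide)]
  exact absurd e12 (by decide)

set_option maxHeartbeats 1000000 in
theorem pv_main (l : List Char) (fuel k c : Nat) (hc : c ≤ k)
    (hk : k ≤ (PySem.Chars.lower l).length)
    (hfuel : ((pvOcc (PySem.Chars.lower l) pvSSlow).dropWhile (fun i => decide (i < k))).length < fuel) :
    pvALoop l fuel (PySem.Chars.findFrom (PySem.Chars.lower l) pvSSlow (k : Int) none) =
    pvBLoop l ((pvOcc (PySem.Chars.lower l) pvSSlow).dropWhile (fun i => decide (i < k)))
              ((pvOcc (PySem.Chars.lower l) pvSElow).dropWhile (fun i => decide (i < c))) := by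
  induction fuel generalizing k c with
  | zero => exact absurd hfuel (Nat.not_lt_zero _)
  | succ fuel ih =>
    have hSS : pvSSlow ≠ [] := by decide
    have hSE : pvSElow ≠ [] := by decide
    rw [pv_findFrom_occ _ pvSSlow hSS k hk]
    cases hDS : (pvOcc (PySem.Chars.lower l) pvSSlow).dropWhile (fun i => decide (i < k)) with
    | nil => simp [pvALoop, pvBLoop_nil]
    | cons a rest =>
      have haS : a ∈ pvOcc (PySem.Chars.lower l) pvSSlow :=
        (List.dropWhile_sublist _).subset (hDS ▸ List.mem_cons_self)
      have hka : ¬ (a < k) := by simpa using pv_head_dropWhile _ _ hDS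
      obtain ⟨halen, haocc⟩ := pv_mem_occ.mp haS
      have hEchain : ((pvOcc (PySem.Chars.lower l) pvSElow).dropWhile (fun i => decide (i < c))).dropWhile
          (fun e => decide (e < a)) = (pvOcc (PySem.Chars.lower l) pvSElow).dropWhile (fun e => decide (e < a)) :=
        pv_dropWhile_dropWhile (fun x hx => by simp only [decide_eq_true_eq] at hx ⊢; omega) _
      simp only [pvALoop]
      rw [if_pos (show ((a : Nat) : Int) > -1 by omega)]
      rw [pv_findFrom_occ _ pvSElow hSE a (le_of_lt halen)]
      cases hDE : (pvOcc (PySem.Chars.lower l) pvSElow).dropWhile (fun e => decide (e < a)) with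
      | nil =>
        rw [pvBLoop_cons_nil l a rest _ (by rw [hEchain]; exact hDE)]
        simp
      | cons b ends' =>
        have hbE : b ∈ pvOcc (PySem.Chars.lower l) pvSElow :=
          (List.dropWhile_sublist _).subset (hDE ▸ List.mem_cons_self)
        have hab : a ≤ b := by
          have := pv_head_dropWhile _ _ hDE; simp at this; omega
        obtain ⟨hblen, hbocc⟩ := pv_mem_occ.mp hbE
        rw [if_neg (show ¬ (((b : Nat) : Int) = -1) by omega)]
        rw [pvBLoop_cons_cons l a rest _ ends' b (by rw [hEchain]; exact hDE)]
        have hbnotS : b ∉ pvOcc (PySem.Chars.lower l) pvSSlow := fun hb =>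
          pv_clash (PySem.Chars.lower l) b ⟨(pv_mem_occ.mp hb).2, hbocc⟩
        have h1 : (a :: rest).dropWhile (fun s => decide (s ≤ b)) =
            (pvOcc (PySem.Chars.lower l) pvSSlow).dropWhile (fun s => decide (s ≤ b)) := by
          rw [← hDS]
          exact pv_dropWhile_dropWhile (fun x hx => by simp only [decide_eq_true_eq] at hx ⊢; omega) _
        have h2 : (pvOcc (PySem.Chars.lower l) pvSSlow).dropWhile (fun s => decide (s ≤ b)) =
            (pvOcc (PySem.Chars.lower l) pvSSlow).dropWhile (fun s => decide (s < b)) :=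
          pv_dropWhile_congr _ (fun x hx => by
            have hxb : x ≠ b := fun hxb => hbnotS (hxb ▸ hx)
            simp; omega)
        have hrest : (pvOcc (PySem.Chars.lower l) pvSSlow).dropWhile (fun s => decide (s < b)) =
            rest.dropWhile (fun s => decide (s ≤ b)) := by
          rw [← h2, ← h1, List.dropWhile_cons]
          simp [hab]
        have hfuel' : ((pvOcc (PySem.Chars.lower l) pvSSlow).dropWhile (fun i => decide (i < b))).length < fuel := by
          rw [hrest]
          have h3 := List.length_dropWhile_le (fun s => decide (s ≤ b)) rest
          rw [hDS] at hfuel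
          simp only [List.length_cons] at hfuel
          omega
        rw [h1, h2]
        simp only [List.cons.injEq]
        refine ⟨by trivial, ?_⟩
        have := ih b a hab (le_of_lt hblen) hfuel'
        rw [hDE] at this
        exact this

-- ===== VERDICT (by name: the statement is the Claim_ definition above) =====
theorem get_search_strings_spec : Claim_equal_get_search_strings := by
  intro result _
  unfold Spec_get_search_strings get_search_strings get_search_strings_alt
  rw [← PySem.Chars.findFrom_zero]
  have h0 : ∀ tok, (pvOcc (PySem.Chars.lower result.toList) tok).dropWhile (fun i => decide (i < 0)) =
      pvOcc (PySem.Chars.lower result.toList) tok := by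
    intro tok
    apply List.dropWhile_eq_self_iff.mpr
    intro hl
    simp
  have hlow : (PySem.Chars.lower result.toList).length = result.toList.length := by
    simp [PySem.Chars.lower]
  have hfuel : ((pvOcc (PySem.Chars.lower result.toList) pvSSlow).dropWhile (fun i => decide (i < 0))).length <
      result.toList.length + 1 := by
    rw [h0]
    have h1 : (pvOcc (PySem.Chars.lower result.toList) pvSSlow).length ≤
        (PySem.Chars.lower result.toList).length := by
      have := List.length_filter_le
        (fun i => PySem.Chars.startswith ((PySem.Chars.lower result.toList).drop i) pvSSlow)
        (List.range (PySem.Chars.lower result.toList).length)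
      simpa [pvOcc] using this
    omega
  have hmain := pv_main result.toList (result.toList.length + 1) 0 0 le_rfl (Nat.zero_le _) hfuel
  rw [h0, h0] at hmain
  simpa using hmain
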